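-- pv_equiv track=rewrite | github.com/ShanechiLab/BaRISTA | barista/data/braintreebank_dataset_spatial_groupings.py | _get_group_ids_based_on_group_components
-- ===== SOURCE A (Python) =====
-- from typing import List, Tuple
--
-- def _get_group_ids_based_on_group_components(
--     group_components: List[Tuple], n_effective_componetns: int
-- ) -> List[int]:
--     groups_to_id_mapping = dict()
--     group_id = 0
--     group_ids = []
--     for components in group_components:
--         group = components[:n_effective_componetns]
--         if group not in groups_to_id_mapping:
--             chan_group_id = group_id
--             groups_to_id_mapping[group] = group_id
--             group_id += 1
--         else:
--             chan_group_id = groups_to_id_mapping[group]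
--         group_ids.append(chan_group_id)
--
--     return group_ids
-- ===== SOURCE B (Python) =====
-- def _get_group_ids_based_on_group_components(group_components, n_effective_componetns):
--     # The id of a group is the number of distinct prefix groups that appear
--     # strictly before its first occurrence (= its rank in first-appearance order).
--     prefixes = [c[:n_effective_componetns] for c in group_components]
--     return [len(set(prefixes[:prefixes.index(p)])) for p in prefixes]
-- ===== Notes on version B (the rewrite author's own statement) =====
-- stated objective: alternative
-- what changed: Replaced A's stateful single pass (dict of seen groups + running counter) by a stateless characterisation: each element's id is the number of distinct prefixes strictly before the first occurrence of its own prefix, computed per element with list.index and a set - no dict, no counter, no incremental state.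
import Mathlib
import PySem

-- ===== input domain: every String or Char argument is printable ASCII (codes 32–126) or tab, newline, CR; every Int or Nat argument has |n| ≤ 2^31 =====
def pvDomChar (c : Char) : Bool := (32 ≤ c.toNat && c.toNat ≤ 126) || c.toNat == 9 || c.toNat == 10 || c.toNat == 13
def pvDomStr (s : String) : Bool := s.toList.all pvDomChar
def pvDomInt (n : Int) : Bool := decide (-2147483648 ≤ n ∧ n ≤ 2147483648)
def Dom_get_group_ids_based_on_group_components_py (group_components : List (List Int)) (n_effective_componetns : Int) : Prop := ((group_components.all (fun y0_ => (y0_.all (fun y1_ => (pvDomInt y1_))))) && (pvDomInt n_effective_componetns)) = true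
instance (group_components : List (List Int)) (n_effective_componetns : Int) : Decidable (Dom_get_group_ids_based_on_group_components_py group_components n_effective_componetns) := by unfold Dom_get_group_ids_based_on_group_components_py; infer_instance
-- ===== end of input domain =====

-- B replaces A's stateful pass (dict + running counter) by a stateless per-element
-- characterisation: id = number of distinct prefixes before the first occurrence; objective: alternative.


-- ===== PORT A =====
-- body of A's loop: state = (groups_to_id_mapping, group_id, group_ids)
def pvAStep (n_effective_componetns : Int)
    (st : PySem.Dict (List Int) Int × Int × List Int) (components : List Int) :
    PySem.Dict (List Int) Int × Int × List Int :=
  let group := PySem.List.slice components none (some n_effective_componetns)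
  if st.1.contains group = false then
    (st.1.insert group st.2.1, st.2.1 + 1, st.2.2 ++ [st.2.1])
  else
    -- groups_to_id_mapping[group]: the key is present here (contains = true), so getD is exact
    (st.1, st.2.1, st.2.2 ++ [st.1.getD group 0])

def get_group_ids_based_on_group_components_py (group_components : List (List Int)) (n_effective_componetns : Int) : List Int :=
  (group_components.foldl (pvAStep n_effective_componetns) (PySem.Dict.empty, 0, [])).2.2

-- ===== PORT B =====
-- len(set(prefixes[:prefixes.index(p)])); in B's comprehension p ∈ prefixes always,
-- the none branch (Python: ValueError from .index) is unreachable
def pvBVal (prefixes : List (List Int)) (p : List Int) : Int :=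
  match PySem.List.index? prefixes p with
  | some j => ((PySem.Set.ofList (PySem.List.slice prefixes none (some (j : Int)))).length : Int)
  | none => 0

def get_group_ids_based_on_group_components_py_alt (group_components : List (List Int)) (n_effective_componetns : Int) : List Int :=
  let prefixes := group_components.map (fun c => PySem.List.slice c none (some n_effective_componetns))
  prefixes.map (pvBVal prefixes)

-- ===== PRECONDITION & SPEC =====
def Spec_get_group_ids_based_on_group_components_py (group_components : List (List Int)) (n_effective_componetns : Int) (out : List Int) : Prop := out = get_group_ids_based_on_group_components_py_alt group_components n_effective_componetns
instance (group_components : List (List Int)) (n_effective_componetns : Int) (out : List Int) : Decidable (Spec_get_group_ids_based_on_group_components_py group_components n_effective_componetns out) := by unfold Spec_get_group_ids_based_on_group_components_py; infer_instance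

-- ===== CLAIM (what is proved, stated in full; the proofs are below) =====
def Claim_equal_get_group_ids_based_on_group_components_py : Prop := ∀ (group_components : List (List Int)) (n_effective_componetns : Int), Dom_get_group_ids_based_on_group_components_py group_components n_effective_componetns → Spec_get_group_ids_based_on_group_components_py group_components n_effective_componetns (get_group_ids_based_on_group_components_py group_components n_effective_componetns)

-- ===== LEMMAS AND PROOFS =====

-- A's step re-expressed on the prefix itself (A slices inside its loop)
def pvAStepP (st : PySem.Dict (List Int) Int × Int × List Int) (p : List Int) :
    PySem.Dict (List Int) Int × Int × List Int :=
  if st.1.contains p = false then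
    (st.1.insert p st.2.1, st.2.1 + 1, st.2.2 ++ [st.2.1])
  else
    (st.1, st.2.1, st.2.2 ++ [st.1.getD p 0])

theorem pvAStep_eq_map (gcs : List (List Int)) (n : Int) (st) :
    gcs.foldl (pvAStep n) st =
      (gcs.map (fun c => PySem.List.slice c none (some n))).foldl pvAStepP st := by
  rw [List.foldl_map]; rfl

-- the loop invariant tying A's dict to B's stateless value
def pvInv (seen : List (List Int)) (m : PySem.Dict (List Int) Int) (gid : Int) : Prop :=
  (∀ k, m.contains k = true ↔ k ∈ seen) ∧
  gid = ((PySem.Set.ofList seen).length : Int) ∧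
  (∀ k, k ∈ seen → m.getD k 0 = pvBVal seen k)

theorem pvBVal_stable (seen t : List (List Int)) (p : List Int) (hp : p ∈ seen) :
    pvBVal (seen ++ t) p = pvBVal seen p := by
  unfold pvBVal
  rw [PySem.List.index?_append_of_mem t hp]
  obtain ⟨j, hj⟩ := Option.isSome_iff_exists.mp ((PySem.List.index?_isSome_iff seen p).mpr hp)
  rw [hj]
  dsimp only
  obtain ⟨pre, suf, hdec, hlen, _⟩ := (PySem.List.index?_eq_some_iff seen p j).mp hj
  have hle : j ≤ seen.length := by subst hdec; simp [← hlen]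
  rw [PySem.List.slice_to_natCast, PySem.List.slice_to_natCast,
      List.take_append_of_le_length hle]

theorem pvBVal_fresh (seen t : List (List Int)) (p : List Int) (hp : p ∉ seen) :
    pvBVal (seen ++ p :: t) p = ((PySem.Set.ofList seen).length : Int) := by
  unfold pvBVal
  have : PySem.List.index? (seen ++ p :: t) p = some seen.length :=
    (PySem.List.index?_eq_some_iff (seen ++ p :: t) p seen.length).mpr ⟨seen, t, rfl, rfl, hp⟩
  rw [this]
  dsimp only
  rw [PySem.List.slice_to_natCast, List.take_left]

theorem pvOfList_append_mem (seen : List (List Int)) (p : List Int) (hp : p ∈ seen) :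
    PySem.Set.ofList (seen ++ [p]) = PySem.Set.ofList seen := by
  rw [PySem.Set.ofList_eq_foldl, List.foldl_append, ← PySem.Set.ofList_eq_foldl]
  simp only [List.foldl_cons, List.foldl_nil]
  simp [PySem.Set.add, PySem.Set.contains, PySem.Set.mem_ofList, hp]

theorem pvOfList_append_fresh (seen : List (List Int)) (p : List Int) (hp : p ∉ seen) :
    PySem.Set.ofList (seen ++ [p]) = PySem.Set.ofList seen ++ [p] := by
  rw [PySem.Set.ofList_eq_foldl, List.foldl_append, ← PySem.Set.ofList_eq_foldl]
  simp only [List.foldl_cons, List.foldl_nil]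
  simp [PySem.Set.add, PySem.Set.contains, PySem.Set.mem_ofList, hp]

-- main lemma: from any state satisfying the invariant, A's remaining loop emits B's values
theorem pv_main (rest seen : List (List Int)) (m : PySem.Dict (List Int) Int)
    (gid : Int) (out : List Int) (hinv : pvInv seen m gid) :
    (rest.foldl pvAStepP (m, gid, out)).2.2 =
      out ++ rest.map (pvBVal (seen ++ rest)) := by
  induction rest generalizing seen m gid out with
  | nil => simp
  | cons p rest' ih =>
    obtain ⟨hmem, hgid, hval⟩ := hinv
    simp only [List.foldl_cons, List.map_cons]
    by_cases hc : m.contains p = true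
    · have hp : p ∈ seen := (hmem p).mp hc
      have hstep : pvAStepP (m, gid, out) p = (m, gid, out ++ [m.getD p 0]) := by
        simp [pvAStepP, hc]
      have hinv' : pvInv (seen ++ [p]) m gid := by
        refine ⟨fun k => ?_, ?_, fun k hk => ?_⟩
        · rw [hmem k]; constructor
          · exact fun h => List.mem_append_left _ h
          · intro h; rcases List.mem_append.mp h with h | h
            · exact h
            · simpa using (List.mem_singleton.mp h) ▸ hp
        · rw [pvOfList_append_mem seen p hp]; exact hgid
        · have hk' : k ∈ seen := by
            rcases List.mem_append.mp hk with h | h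
            · exact h
            · simpa using (List.mem_singleton.mp h) ▸ hp
          rw [hval k hk', pvBVal_stable seen [p] k hk']
      have := ih (seen ++ [p]) m gid (out ++ [m.getD p 0]) hinv'
      rw [hstep, this, List.append_assoc (seen) [p] rest']
      simp only [List.singleton_append]
      rw [hval p hp, pvBVal_stable seen (p :: rest') p hp]
      simp
    · have hc' : m.contains p = false := by simpa using hc
      have hp : p ∉ seen := fun h => by rw [← hmem p] at h; simp [hc'] at h
      have hstep : pvAStepP (m, gid, out) p = (m.insert p gid, gid + 1, out ++ [gid]) := by
        simp [pvAStepP, hc']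
      have hinv' : pvInv (seen ++ [p]) (m.insert p gid) (gid + 1) := by
        refine ⟨fun k => ?_, ?_, fun k hk => ?_⟩
        · rw [PySem.Dict.contains_insert, Bool.or_eq_true, beq_iff_eq, hmem k]
          simp [or_comm]
        · rw [pvOfList_append_fresh seen p hp, hgid]; simp
        · rcases List.mem_append.mp hk with hk' | hk'
          · have hkp : k ≠ p := fun h => hp (h ▸ hk')
            rw [PySem.Dict.getD_insert_of_ne m gid 0 hkp, hval k hk',
                pvBVal_stable seen [p] k hk']
          · have hkp : k = p := List.mem_singleton.mp hk'
            subst hkp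
            rw [PySem.Dict.getD_insert_self]
            have : pvBVal (seen ++ [k]) k = ((PySem.Set.ofList seen).length : Int) :=
              pvBVal_fresh seen [] k hp
            rw [this, hgid]
      have := ih (seen ++ [p]) (m.insert p gid) (gid + 1) (out ++ [gid]) hinv'
      rw [hstep, this, List.append_assoc (seen) [p] rest']
      simp only [List.singleton_append]
      rw [pvBVal_fresh seen rest' p hp, hgid]
      simp

-- ===== VERDICT (by name: the statement is the Claim_ definition above) =====
theorem get_group_ids_based_on_group_components_py_spec : Claim_equal_get_group_ids_based_on_group_components_py := by
  intro gcs n _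
  unfold Spec_get_group_ids_based_on_group_components_py
  unfold get_group_ids_based_on_group_components_py get_group_ids_based_on_group_components_py_alt
  rw [pvAStep_eq_map]
  rw [pv_main (gcs.map (fun c => PySem.List.slice c none (some n))) [] PySem.Dict.empty 0 []
      ⟨by simp [PySem.Dict.contains_empty], by simp, by simp⟩]
  simp
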